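-- pv_equiv track=rewrite | github.com/nastyh/LeetCode | Basic Data Structures/followers_communities_reddit.py | get_related_communities
-- ===== SOURCE A (Python) =====
-- def get_related_communities(community_id):
--     # Predefined mappings
--     community_to_followers = {
--         "C1": ["F1", "F3"],
--         "C2": ["F1", "F2"],
--         "C3": ["F2"],
--         "C4": ["F3"]
--     }
--
--     follower_to_communities = {
--         "F1": ["C1", "C2"],
--         "F2": ["C2", "C3"],
--         "F3": ["C1", "C4"]
--     }
--
--     # Get the followers of the input community
--     followers_of_community = community_to_followers.get(community_id, [])
--
--     # Initialize a set to store related communities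
--     related_communities = set()
--
--     # Loop through each follower of the input community
--     for follower in followers_of_community:
--         # Get the communities followed by this follower
--         communities = follower_to_communities.get(follower, [])
--         # Add these communities to the related communities set
--         related_communities.update(communities)
--
--     # Remove the input community from the result (if it exists)
--     related_communities.discard(community_id)
--
--     # Return the result as a sorted list (optional, for consistent order)
--     return sorted(related_communities)
-- ===== SOURCE B (Python) =====
-- def get_related_communities(community_id):
--     # Single forward mapping; relatedness = sharing at least one follower.
--     community_to_followers = {
--         "C1": ["F1", "F3"],
--         "C2": ["F1", "F2"],
--         "C3": ["F2"],
--         "C4": ["F3"],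
--     }
--     mine = set(community_to_followers.get(community_id, []))
--     related = set()
--     for c, fs in community_to_followers.items():
--         if c != community_id and mine & set(fs):
--             related.add(c)
--     return sorted(related)
-- ===== Notes on version B (the rewrite author's own statement) =====
-- stated objective: alternative
-- what changed: B drops the inverted follower_to_communities index entirely and instead scans the forward community_to_followers mapping once, collecting every other community whose follower set intersects the input community's followers.
import Mathlib
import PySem

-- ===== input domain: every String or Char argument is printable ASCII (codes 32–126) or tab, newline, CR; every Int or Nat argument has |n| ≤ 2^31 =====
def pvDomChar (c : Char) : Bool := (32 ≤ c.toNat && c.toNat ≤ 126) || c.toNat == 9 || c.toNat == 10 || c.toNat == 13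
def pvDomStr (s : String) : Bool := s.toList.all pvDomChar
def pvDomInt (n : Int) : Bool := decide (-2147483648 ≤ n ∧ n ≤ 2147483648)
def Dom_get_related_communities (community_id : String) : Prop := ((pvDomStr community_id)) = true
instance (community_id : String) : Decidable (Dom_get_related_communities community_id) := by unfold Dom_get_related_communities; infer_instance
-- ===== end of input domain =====

-- B replaces the inverted follower index with a shared-follower intersection scan of the forward mapping (alternative decomposition, same result).

-- ===== PORT A =====
def get_related_communities (community_id : String) : List String :=
  let community_to_followers : PySem.Dict String (List String) :=
    PySem.Dict.ofList [("C1", ["F1", "F3"]), ("C2", ["F1", "F2"]), ("C3", ["F2"]), ("C4", ["F3"])]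
  let follower_to_communities : PySem.Dict String (List String) :=
    PySem.Dict.ofList [("F1", ["C1", "C2"]), ("F2", ["C2", "C3"]), ("F3", ["C1", "C4"])]
  let followers_of_community := community_to_followers.getD community_id []
  let related_communities : PySem.Set String :=
    followers_of_community.foldl
      (fun s follower => PySem.Set.update s (follower_to_communities.getD follower []))
      PySem.Set.empty
  let related_communities := PySem.Set.discard related_communities community_id
  PySem.List.sorted related_communities (fun x => x) false

-- ===== PORT B =====
def get_related_communities_alt (community_id : String) : List String :=
  let community_to_followers : PySem.Dict String (List String) :=
    PySem.Dict.ofList [("C1", ["F1", "F3"]), ("C2", ["F1", "F2"]), ("C3", ["F2"]), ("C4", ["F3"])]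
  let mine : PySem.Set String := PySem.Set.ofList (community_to_followers.getD community_id [])
  let related : PySem.Set String :=
    community_to_followers.items.foldl
      (fun s p =>
        if p.1 ≠ community_id ∧ PySem.Set.inter mine (PySem.Set.ofList p.2) ≠ [] then
          PySem.Set.add s p.1
        else s)
      PySem.Set.empty
  PySem.List.sorted related (fun x => x) false

-- ===== PRECONDITION & SPEC =====
def Spec_get_related_communities (community_id : String) (out : List String) : Prop := out = get_related_communities_alt community_id
instance (community_id : String) (out : List String) : Decidable (Spec_get_related_communities community_id out) := by unfold Spec_get_related_communities; infer_instance

-- ===== CLAIM (what is proved, stated in full; the proofs are below) =====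
def Claim_equal_get_related_communities : Prop := ∀ (community_id : String), Dom_get_related_communities community_id → Spec_get_related_communities community_id (get_related_communities community_id)

-- ===== LEMMAS AND PROOFS =====

-- ===== VERDICT (by name: the statement is the Claim_ definition above) =====
theorem get_related_communities_spec : Claim_equal_get_related_communities := by
  intro cid _
  unfold Spec_get_related_communities
  by_cases h1 : cid = "C1"
  · subst h1; simp [get_related_communities, get_related_communities_alt, PySem.Dict.getD, PySem.Dict.ofList, PySem.Dict.get?, PySem.Set.ofList, PySem.Set.update, PySem.Set.add, PySem.Set.discard, PySem.Set.inter, PySem.Set.empty, PySem.List.sorted] ; decide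
  by_cases h2 : cid = "C2"
  · subst h2; simp [get_related_communities, get_related_communities_alt, PySem.Dict.getD, PySem.Dict.ofList, PySem.Dict.get?, PySem.Set.ofList, PySem.Set.update, PySem.Set.add, PySem.Set.discard, PySem.Set.inter, PySem.Set.empty, PySem.List.sorted] ; decide
  by_cases h3 : cid = "C3"
  · subst h3; simp [get_related_communities, get_related_communities_alt, PySem.Dict.getD, PySem.Dict.ofList, PySem.Dict.get?, PySem.Set.ofList, PySem.Set.update, PySem.Set.add, PySem.Set.discard, PySem.Set.inter, PySem.Set.empty, PySem.List.sorted] ; decide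
  by_cases h4 : cid = "C4"
  · subst h4; simp [get_related_communities, get_related_communities_alt, PySem.Dict.getD, PySem.Dict.ofList, PySem.Dict.get?, PySem.Set.ofList, PySem.Set.update, PySem.Set.add, PySem.Set.discard, PySem.Set.inter, PySem.Set.empty, PySem.List.sorted] ; decide
  have n1 : ("C1" == cid) = false := by simp; exact fun h => h1 h.symm
  have n2 : ("C2" == cid) = false := by simp; exact fun h => h2 h.symm
  have n3 : ("C3" == cid) = false := by simp; exact fun h => h3 h.symm
  have n4 : ("C4" == cid) = false := by simp; exact fun h => h4 h.symm
  simp [get_related_communities, get_related_communities_alt, PySem.Dict.ofList,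
    PySem.Dict.update, PySem.Dict.insert, PySem.Dict.empty,
    PySem.Dict.getD_eq_get?_getD, PySem.Dict.get?,
    n1, n2, n3, n4,
    PySem.Set.ofList, PySem.Set.empty, PySem.Set.inter, PySem.Set.discard,
    PySem.List.sorted]
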